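-- pv_equiv track=rewrite | github.com/elijahrenner/plants-vt-stem-2024 | app.py | electron_configuration
-- ===== SOURCE A (Python) =====
-- def electron_configuration(num_electrons):
--     orbitals = [
--         "1s",
--         "2s",
--         "2p",
--         "3s",
--         "3p",
--         "4s",
--         "3d",
--         "4p",
--         "5s",
--         "4d",
--         "5p",
--         "6s",
--         "4f",
--         "5d",
--         "6p",
--         "7s",
--         "5f",
--         "6d",
--         "7p",
--     ]
--
--     electron_count = 0
--     orbital_index = 0
--     electron_contents = {}
--
--     while electron_count < num_electrons and orbital_index < len(orbitals):
--         orbital = orbitals[orbital_index]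
--         if orbital.endswith("s"):
--             max_electrons = 2
--         elif orbital.endswith("p"):
--             max_electrons = 6
--         elif orbital.endswith("d"):
--             max_electrons = 10
--         elif orbital.endswith("f"):
--             max_electrons = 14
--         electrons_added = min(num_electrons - electron_count, max_electrons)
--
--         # fill the orbital with electrons and their spin direction
--         for i in range(electrons_added):
--             if orbital not in electron_contents:
--                 electron_contents[orbital] = {"up": 0, "down": 0}
--             if electron_contents[orbital]["up"] < max_electrons // 2:
--                 electron_contents[orbital]["up"] += 1
--             else:
--                 electron_contents[orbital]["down"] += 1
--             electron_count += 1
--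
--         orbital_index += 1
--
--     return electron_contents
-- ===== SOURCE B (Python) =====
-- def electron_configuration(num_electrons):
--     pairs = [
--         ("1s", 2), ("2s", 2), ("2p", 6), ("3s", 2), ("3p", 6),
--         ("4s", 2), ("3d", 10), ("4p", 6), ("5s", 2), ("4d", 10),
--         ("5p", 6), ("6s", 2), ("4f", 14), ("5d", 10), ("6p", 6),
--         ("7s", 2), ("5f", 14), ("6d", 10), ("7p", 6),
--     ]
--     config = {}
--     remaining = num_electrons
--     for orbital, cap in pairs:
--         if remaining <= 0:
--             break
--         added = min(remaining, cap)
--         up = min(added, cap // 2)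
--         config[orbital] = {"up": up, "down": added - up}
--         remaining -= added
--     return config
-- ===== Notes on version B (the rewrite author's own statement) =====
-- stated objective: simpler
-- what changed: Replaces the per-electron inner loop with lazy dict creation and per-electron spin branching by a direct closed-form fill per orbital (up = min(added, cap//2), down = added - up) over a fixed (orbital, capacity) pair list, creating each entry at once.
import Mathlib
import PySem

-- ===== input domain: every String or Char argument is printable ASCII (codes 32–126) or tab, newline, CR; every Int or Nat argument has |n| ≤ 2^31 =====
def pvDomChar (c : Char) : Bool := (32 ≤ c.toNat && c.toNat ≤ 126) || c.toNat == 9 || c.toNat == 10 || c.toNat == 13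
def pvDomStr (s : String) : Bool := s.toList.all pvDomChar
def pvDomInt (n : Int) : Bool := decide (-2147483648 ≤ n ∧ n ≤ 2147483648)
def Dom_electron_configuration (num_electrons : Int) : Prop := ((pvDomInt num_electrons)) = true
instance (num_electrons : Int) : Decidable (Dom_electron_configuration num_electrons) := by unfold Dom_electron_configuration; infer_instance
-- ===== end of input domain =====

-- B replaces A's per-electron inner loop and lazy dict entry creation by a single
-- closed-form fill per orbital over a fixed (orbital, capacity) list (objective: simpler).

-- ===== PORT A =====
def ecOrbitals : List String :=
  ["1s", "2s", "2p", "3s", "3p", "4s", "3d", "4p", "5s", "4d",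
   "5p", "6s", "4f", "5d", "6p", "7s", "5f", "6d", "7p"]

-- the if/elif chain on the orbital letter; on the fixed list above one branch always fires,
-- so the final else (Python's 'elif … "f"') is exact here
def ecMax (orbital : String) : Int :=
  if PySem.Str.endswith orbital "s" then 2
  else if PySem.Str.endswith orbital "p" then 6
  else if PySem.Str.endswith orbital "d" then 10
  else 14

-- one iteration of A's inner 'for i in range(electrons_added)' loop (state: dict, electron_count)
def ecFill (orbital : String) (max_electrons : Int)
    (st : PySem.Dict String (PySem.Dict String Int) × Int) (_i : Int) :
    PySem.Dict String (PySem.Dict String Int) × Int :=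
  let d := if st.1.contains orbital then st.1
           else st.1.insert orbital (PySem.Dict.ofList [("up", 0), ("down", 0)])
  -- orbital is present in d here, so getD with a default is Python's d[orbital] exactly
  let inner := d.getD orbital PySem.Dict.empty
  let d := if inner.getD "up" 0 < PySem.Int.floordiv max_electrons 2
           then d.modify orbital PySem.Dict.empty (fun inn => inn.insert "up" (inn.getD "up" 0 + 1))
           else d.modify orbital PySem.Dict.empty (fun inn => inn.insert "down" (inn.getD "down" 0 + 1))
  (d, st.2 + 1)

-- A's while loop; the index walking the fixed list is the structural recursion on its suffix
def ecLoop (num_electrons : Int) (orbs : List String) (electron_count : Int)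
    (d : PySem.Dict String (PySem.Dict String Int)) : PySem.Dict String (PySem.Dict String Int) :=
  match orbs with
  | [] => d
  | orbital :: rest =>
    if electron_count < num_electrons then
      let max_electrons := ecMax orbital
      let electrons_added := min (num_electrons - electron_count) max_electrons
      let st := (PySem.List.pyRange 0 electrons_added 1).foldl (ecFill orbital max_electrons) (d, electron_count)
      ecLoop num_electrons rest st.2 st.1
    else d

def electron_configuration (num_electrons : Int) : List (String × List (String × Int)) :=
  (ecLoop num_electrons ecOrbitals 0 PySem.Dict.empty).items.map (fun p => (p.1, p.2.items))

-- ===== PORT B =====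
def ecPairs : List (String × Int) :=
  [("1s", 2), ("2s", 2), ("2p", 6), ("3s", 2), ("3p", 6),
   ("4s", 2), ("3d", 10), ("4p", 6), ("5s", 2), ("4d", 10),
   ("5p", 6), ("6s", 2), ("4f", 14), ("5d", 10), ("6p", 6),
   ("7s", 2), ("5f", 14), ("6d", 10), ("7p", 6)]

def ecAltLoop (remaining : Int) (pairs : List (String × Int)) : List (String × List (String × Int)) :=
  match pairs with
  | [] => []
  | (orbital, cap) :: rest =>
    if remaining ≤ 0 then []
    else
      let added := min remaining cap
      let up := min added (PySem.Int.floordiv cap 2)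
      (orbital, [("up", up), ("down", added - up)]) :: ecAltLoop (remaining - added) rest

def electron_configuration_alt (num_electrons : Int) : List (String × List (String × Int)) :=
  ecAltLoop num_electrons ecPairs

-- ===== PRECONDITION & SPEC =====
def Spec_electron_configuration (num_electrons : Int) (out : List (String × List (String × Int))) : Prop := out = electron_configuration_alt num_electrons
instance (num_electrons : Int) (out : List (String × List (String × Int))) : Decidable (Spec_electron_configuration num_electrons out) := by unfold Spec_electron_configuration; infer_instance

-- ===== CLAIM (what is proved, stated in full; the proofs are below) =====
def Claim_equal_electron_configuration : Prop := ∀ (num_electrons : Int), Dom_electron_configuration num_electrons → Spec_electron_configuration num_electrons (electron_configuration num_electrons)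

-- ===== LEMMAS AND PROOFS =====

-- every orbital capacity A computes is twice a positive half-capacity
lemma ecMax_even (o : String) : ∃ h : Int, ecMax o = 2 * h ∧ 1 ≤ h := by
  unfold ecMax
  split_ifs
  · exact ⟨1, by norm_num⟩
  · exact ⟨3, by norm_num⟩
  · exact ⟨5, by norm_num⟩
  · exact ⟨7, by norm_num⟩

lemma ec_floordiv_two (h : Int) : PySem.Int.floordiv (2 * h) 2 = h := by
  rw [PySem.Int.floordiv_eq_ediv_of_pos (by norm_num)]
  omega

-- A's first inner-loop iteration on a dict without the orbital: create the entry, one spin up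
lemma ecFill_fresh (orbital : String) (h : Int) (d : PySem.Dict String (PySem.Dict String Int))
    (c i : Int) (hh : 1 ≤ h) (hcont : d.contains orbital = false) :
    ecFill orbital (2 * h) (d, c) i
      = (d.insert orbital (PySem.Dict.mk [("up", 1), ("down", 0)]), c + 1) := by
  have hof : PySem.Dict.ofList [("up", (0 : Int)), ("down", 0)]
      = PySem.Dict.mk [("up", 0), ("down", 0)] := by decide
  simp only [ecFill, hcont, Bool.false_eq_true, if_false, hof, PySem.Dict.getD_insert_self,
    ec_floordiv_two]
  have hc0 : (PySem.Dict.mk [("up", (0 : Int)), ("down", 0)]).getD "up" 0 = 0 := by decide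
  rw [hc0, if_pos (by omega : (0 : Int) < h), PySem.Dict.modify, PySem.Dict.getD_insert_self,
    PySem.Dict.insert_insert_self]
  have : (PySem.Dict.mk [("up", (0 : Int)), ("down", 0)]).insert "up"
      ((PySem.Dict.mk [("up", (0 : Int)), ("down", 0)]).getD "up" 0 + 1)
      = PySem.Dict.mk [("up", 1), ("down", 0)] := by decide
  rw [this]

-- one later inner-loop iteration: the orbital is already the freshly inserted entry
lemma ecFill_present (orbital : String) (m : Int) (d : PySem.Dict String (PySem.Dict String Int))
    (inn : PySem.Dict String Int) (c i : Int) :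
    ecFill orbital m (d.insert orbital inn, c) i
      = ((if inn.getD "up" 0 < PySem.Int.floordiv m 2
          then d.insert orbital (inn.insert "up" (inn.getD "up" 0 + 1))
          else d.insert orbital (inn.insert "down" (inn.getD "down" 0 + 1))), c + 1) := by
  simp only [ecFill, PySem.Dict.contains_insert_self, if_true, PySem.Dict.getD_insert_self]
  split_ifs with h1
  · rw [PySem.Dict.modify, PySem.Dict.getD_insert_self, PySem.Dict.insert_insert_self]
  · rw [PySem.Dict.modify, PySem.Dict.getD_insert_self, PySem.Dict.insert_insert_self]

lemma ec_innu (u w v : Int) : (PySem.Dict.mk [("up", u), ("down", w)]).insert "up" v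
    = PySem.Dict.mk [("up", v), ("down", w)] := by simp [PySem.Dict.insert]

lemma ec_innd (u w v : Int) : (PySem.Dict.mk [("up", u), ("down", w)]).insert "down" v
    = PySem.Dict.mk [("up", u), ("down", v)] := by simp [PySem.Dict.insert]

lemma ec_getu (u w : Int) : (PySem.Dict.mk [("up", u), ("down", w)]).getD "up" 0 = u := by
  simp [PySem.Dict.getD, PySem.Dict.get?]

lemma ec_getd (u w : Int) : (PySem.Dict.mk [("up", u), ("down", w)]).getD "down" 0 = w := by
  simp [PySem.Dict.getD, PySem.Dict.get?]

-- the inner per-electron fold, run j ≥ 1 times on a dict not containing the orbital,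
-- appends one entry with up = min j (max/2), down = j - up, and advances the count by j
lemma ecFill_fold (orbital : String) (h : Int) (d : PySem.Dict String (PySem.Dict String Int))
    (count : Int) (hh : 1 ≤ h) (hcont : d.contains orbital = false) :
    ∀ (j : Nat), 1 ≤ j →
    (PySem.List.pyRange 0 (j : Int) 1).foldl (ecFill orbital (2 * h)) (d, count)
      = (d.insert orbital (PySem.Dict.mk
            [("up", min (j : Int) h), ("down", (j : Int) - min (j : Int) h)]), count + j) := by
  intro j
  induction j with
  | zero => omega
  | succ j ih =>
    intro _
    rcases Nat.eq_zero_or_pos j with hj | hj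
    · subst hj
      have hr : PySem.List.pyRange 0 ((0 + 1 : Nat) : Int) 1 = [0] := by decide
      rw [hr, List.foldl_cons, List.foldl_nil, ecFill_fresh orbital h d count 0 hh hcont]
      have h1 : min ((0 + 1 : Nat) : Int) h = 1 := by omega
      rw [h1]
      norm_num
    · have hcast : ((j + 1 : Nat) : Int) = (j : Int) + 1 := by push_cast; ring
      rw [hcast, PySem.List.pyRange_one_succ_right (by positivity), List.foldl_append,
        ih (by omega), List.foldl_cons, List.foldl_nil, ecFill_present, ec_getu, ec_getd,
        ec_floordiv_two]
      by_cases hcase : (j : Int) < h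
      · rw [if_pos (by omega), ec_innu]
        have e1 : min (j : Int) h + 1 = min ((j : Int) + 1) h := by omega
        have e2 : (j : Int) - min (j : Int) h = (j : Int) + 1 - min ((j : Int) + 1) h := by omega
        rw [e1, e2, add_assoc]
      · rw [if_neg (by omega), ec_innd]
        have e1 : min (j : Int) h = min ((j : Int) + 1) h := by omega
        have e2 : (j : Int) - min (j : Int) h + 1 = (j : Int) + 1 - min ((j : Int) + 1) h := by omega
        rw [e2, e1, add_assoc]

-- the outer loops agree: A's loop over a suffix of fresh, distinct orbitals extends the dict
-- exactly by B's loop over the corresponding (orbital, capacity) pairs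
lemma ecLoop_eq (orbs : List String) : ∀ (n count : Int) (d : PySem.Dict String (PySem.Dict String Int)),
    orbs.Nodup → (∀ o ∈ orbs, d.contains o = false) →
    (ecLoop n orbs count d).items.map (fun p => (p.1, p.2.items))
      = d.items.map (fun p => (p.1, p.2.items))
        ++ ecAltLoop (n - count) (orbs.map (fun o => (o, ecMax o))) := by
  induction orbs with
  | nil => intro n count d _ _; simp [ecLoop, ecAltLoop]
  | cons o rest ih =>
    intro n count d hnodup hfresh
    simp only [ecLoop, List.map_cons]
    by_cases hlt : count < n
    · rw [if_pos hlt]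
      obtain ⟨h, hmax, hh⟩ := ecMax_even o
      have hco : d.contains o = false := hfresh o (by simp)
      set A : Int := min (n - count) (ecMax o) with hA
      have hA1 : 1 ≤ A := by rw [hA, hmax]; omega
      have hAnat : ((A.toNat : Nat) : Int) = A := Int.toNat_of_nonneg (by omega)
      have hfold := ecFill_fold o h d count hh hco A.toNat (by omega)
      rw [hAnat] at hfold
      rw [hmax, hfold]
      have hfresh' : ∀ o' ∈ rest, (d.insert o (PySem.Dict.mk
          [("up", min A h), ("down", A - min A h)])).contains o' = false := by
        intro o' ho'
        rw [PySem.Dict.contains_insert]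
        have : o' ≠ o := by rintro rfl; exact (List.nodup_cons.mp hnodup).1 ho'
        simp [this, hfresh o' (List.mem_cons_of_mem _ ho')]
      rw [ih n (count + A) _ (List.nodup_cons.mp hnodup).2 hfresh']
      rw [PySem.Dict.items_insert_of_not_contains _ _ hco, List.map_append]
      have halt : ecAltLoop (n - count) ((o, 2 * h) :: rest.map (fun o => (o, ecMax o)))
          = (o, [("up", min A h), ("down", A - min A h)])
            :: ecAltLoop (n - (count + A)) (rest.map (fun o => (o, ecMax o))) := by
        simp only [ecAltLoop]
        rw [if_neg (by omega), ec_floordiv_two]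
        have hm : min (n - count) (2 * h) = A := by rw [hA, hmax]
        rw [hm]
        have harg : n - count - A = n - (count + A) := by omega
        rw [harg]
      rw [halt, List.append_assoc]
      rfl
    · rw [if_neg hlt]
      simp only [ecAltLoop]
      rw [if_pos (by omega)]
      simp

-- ===== VERDICT (by name: the statement is the Claim_ definition above) =====
theorem electron_configuration_spec : Claim_equal_electron_configuration := by
  intro n _
  unfold Spec_electron_configuration electron_configuration electron_configuration_alt
  have h := ecLoop_eq ecOrbitals n 0 PySem.Dict.empty (by decide) (by decide)
  rw [h]
  have hmap : ecOrbitals.map (fun o => (o, ecMax o)) = ecPairs := by decide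
  simp [hmap, PySem.Dict.empty]
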